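-- pv_equiv track=rewrite | github.com/yalit/advent-of-code | aoc2024/day_19/aoc.py | handle_part_2
-- ===== SOURCE A (Python) =====
-- def handle_part_2(lines: list[str]) -> int:
--     towels = set(sorted(lines[0].split(', ')))
--     max_size = max(map(len, towels))
--
--     count = 0
--
--     memoization = {}
--
--     def is_possible_all(pattern: str, used:tuple[str] = ()) -> int:
--         if pattern == "":
--             return 1
--
--         if pattern in memoization:
--             return memoization[pattern]
--
--         possible_combinations = 0
--         for i in range(1, max_size + 1):
--             if i <= len(pattern) and pattern[-i:] in towels:
--                 possible_combinations += is_possible_all(pattern[:-i], (pattern[-i:],) + used)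
--
--         memoization[pattern] = possible_combinations
--         return possible_combinations
--
--
--     for target in lines[2:]:
--         memoization = {}
--         count += is_possible_all(target)
--     return count
-- ===== SOURCE B (Python) =====
-- def handle_part_2(lines: list[str]) -> int:
--     towels = set(lines[0].split(', '))
--     max_size = max(map(len, towels))
--
--     total = 0
--     for target in lines[2:]:
--         n = len(target)
--         dp = [1] + [0] * n
--         for j in range(1, n + 1):
--             for i in range(1, min(j, max_size) + 1):
--                 if target[j - i:j] in towels:
--                     dp[j] += dp[j - i]
--         total += dp[n]
--     return total
-- ===== Notes on version B (the rewrite author's own statement) =====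
-- stated objective: alternative
-- what changed: Replaced the top-down memoized recursion (a per-target dict of suffix counts filled by recursive calls stripping matching towel suffixes) with a bottom-up DP table per target: dp[0]=1 and dp[j] sums dp[j-i] over towel-matching substrings target[j-i:j], dropping the unused `used` accumulator and the pointless sorted() inside set().
import Mathlib
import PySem

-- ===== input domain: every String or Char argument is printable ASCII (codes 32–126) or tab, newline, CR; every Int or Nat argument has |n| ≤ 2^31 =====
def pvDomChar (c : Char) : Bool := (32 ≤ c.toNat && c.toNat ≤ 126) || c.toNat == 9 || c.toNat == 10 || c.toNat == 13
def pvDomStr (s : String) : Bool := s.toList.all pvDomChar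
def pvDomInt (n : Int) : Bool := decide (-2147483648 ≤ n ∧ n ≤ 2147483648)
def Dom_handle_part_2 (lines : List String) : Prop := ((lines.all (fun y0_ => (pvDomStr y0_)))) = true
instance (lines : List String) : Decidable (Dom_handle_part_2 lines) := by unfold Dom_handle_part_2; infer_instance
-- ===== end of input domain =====

-- B replaces A's memoized top-down recursion by a bottom-up DP table per target (objective: alternative decomposition).

-- ===== PORT A =====
-- is_possible_all: memo dict threaded through explicitly; fuel = pattern length bounds the recursion depth
-- (each recursive call strips at least one trailing char, so fuel never runs out on the initial call).
def pvGoA (tow : PySem.Set (List Char)) (ms : Int) :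
    Nat → List Char → PySem.Dict (List Char) Int → Int × PySem.Dict (List Char) Int
  | fuel, p, memo =>
    if p = [] then (1, memo)
    else
      match PySem.Dict.get? memo p with
      | some v => (v, memo)
      | none =>
        match fuel with
        | 0 => (0, memo)   -- unreachable: fuel starts at the pattern length
        | Nat.succ f =>
          let st := (PySem.List.pyRange 1 (ms + 1) 1).foldl
            (fun (st : Int × PySem.Dict (List Char) Int) i =>
              if i ≤ (p.length : Int) ∧
                  PySem.Set.contains tow (PySem.List.slice p (some (-i)) none) = true then
                let r := pvGoA tow ms f (PySem.List.slice p none (some (-i))) st.2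
                (st.1 + r.1, r.2)
              else st)
            ((0 : Int), memo)
          (st.1, PySem.Dict.insert st.2 p st.1)

def handle_part_2 (lines : List String) : Int :=
  match PySem.List.pyGet? lines 0 with
  | none => 0   -- unreachable under Pre_ (Python raises IndexError on lines = [])
  | some line0 =>
    let towels : PySem.Set (List Char) :=
      PySem.Set.ofList
        ((PySem.List.sorted ((PySem.Str.split? line0 ", ").getD []) (fun x => x) false).map
          String.toList)   -- split? is some: the separator ", " is nonempty
    let max_size : Int :=
      match PySem.List.max? (towels.map (fun t => (t.length : Int))) (fun x => x) with
      | some m => m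
      | none => 0   -- unreachable: split always returns a nonempty list
    (PySem.List.slice lines (some 2) none).foldl
      (fun count target =>
        count + (pvGoA towels max_size target.toList.length target.toList PySem.Dict.empty).1)
      0

-- ===== PORT B =====
def pvWaysB (tow : PySem.Set (List Char)) (ms : Int) (t : List Char) : Int :=
  let n := t.length
  let dp0 : List Int := 1 :: List.replicate n 0
  let dp := (PySem.List.pyRange 1 ((n : Int) + 1) 1).foldl
    (fun dp j =>
      (PySem.List.pyRange 1 (min j ms + 1) 1).foldl
        (fun dp i =>
          if PySem.Set.contains tow (PySem.List.slice t (some (j - i)) (some j)) = true then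
            PySem.List.pySetD dp j (PySem.List.pyGetD dp j 0 + PySem.List.pyGetD dp (j - i) 0)
          else dp)
        dp)
    dp0
  PySem.List.pyGetD dp ((n : Int)) 0

def handle_part_2_alt (lines : List String) : Int :=
  match PySem.List.pyGet? lines 0 with
  | none => 0   -- unreachable under Pre_ (Python raises IndexError on lines = [])
  | some line0 =>
    let towels : PySem.Set (List Char) :=
      PySem.Set.ofList (((PySem.Str.split? line0 ", ").getD []).map String.toList)   -- sep ≠ ""
    let max_size : Int :=
      match PySem.List.max? (towels.map (fun t => (t.length : Int))) (fun x => x) with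
      | some m => m
      | none => 0   -- unreachable: split always returns a nonempty list
    (PySem.List.slice lines (some 2) none).foldl
      (fun total target => total + pvWaysB towels max_size target.toList) 0

-- ===== PRECONDITION & SPEC =====
-- Pre_ excludes only lines = [], on which the Python A raises IndexError at lines[0].
def Pre_handle_part_2 (lines : List String) : Prop := lines ≠ []
instance (lines : List String) : Decidable (Pre_handle_part_2 lines) := by
  unfold Pre_handle_part_2; infer_instance

def pvWitness_handle_part_2 : List String := ["a, ab, b", "", "ab", "aab"]

def Spec_handle_part_2 (lines : List String) (out : Int) : Prop := out = handle_part_2_alt lines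
instance (lines : List String) (out : Int) : Decidable (Spec_handle_part_2 lines out) := by
  unfold Spec_handle_part_2; infer_instance

-- ===== CLAIM (what is proved, stated in full; the proofs are below) =====
def Claim_equal_handle_part_2 : Prop := ∀ (lines : List String), Dom_handle_part_2 lines →
  Pre_handle_part_2 lines → Spec_handle_part_2 lines (handle_part_2 lines)

-- ===== LEMMAS AND PROOFS =====
-- Pure count of towel decompositions, with fuel (the pattern length bounds the recursion).
def pvW (tow : PySem.Set (List Char)) (ms : Int) : Nat → List Char → Int
  | fuel, p =>
    if p = [] then 1
    else
      match fuel with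
      | 0 => 0
      | Nat.succ f =>
        ((PySem.List.pyRange 1 (ms + 1) 1).map (fun i =>
          if i ≤ (p.length : Int) ∧
              PySem.Set.contains tow (PySem.List.slice p (some (-i)) none) = true
          then pvW tow ms f (PySem.List.slice p none (some (-i))) else 0)).sum

def pvWc (tow : PySem.Set (List Char)) (ms : Int) (p : List Char) : Int :=
  pvW tow ms p.length p

lemma pvW_nil (tow : PySem.Set (List Char)) (ms : Int) (fuel : Nat) :
    pvW tow ms fuel [] = 1 := by
  cases fuel <;> simp [pvW]

lemma pvW_succ (tow : PySem.Set (List Char)) (ms : Int) (f : Nat) (p : List Char)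
    (hp : p ≠ []) :
    pvW tow ms (f + 1) p = ((PySem.List.pyRange 1 (ms + 1) 1).map (fun i =>
      if i ≤ (p.length : Int) ∧
          PySem.Set.contains tow (PySem.List.slice p (some (-i)) none) = true
      then pvW tow ms f (PySem.List.slice p none (some (-i))) else 0)).sum := by
  conv_lhs => rw [pvW]
  simp [hp]

lemma pv_slice_to_len {p : List Char} {i : Int} (h1 : 1 ≤ i) (h2 : i ≤ (p.length : Int)) :
    (PySem.List.slice p none (some (-i))).length = p.length - i.toNat := by
  obtain ⟨k, rfl⟩ := Int.eq_ofNat_of_zero_le (by omega : (0 : Int) ≤ i)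
  rw [PySem.List.slice_to_neg_natCast p k (by exact_mod_cast h1)]
  simp [List.length_take]

lemma pvW_stable (tow : PySem.Set (List Char)) (ms : Int) :
    ∀ (f g : Nat) (p : List Char), p.length ≤ f → p.length ≤ g →
      pvW tow ms f p = pvW tow ms g p := by
  intro f
  induction f with
  | zero =>
    intro g p hf _
    have hp : p = [] := List.eq_nil_of_length_eq_zero (Nat.le_zero.mp hf)
    subst hp; rw [pvW_nil, pvW_nil]
  | succ f ih =>
    intro g p hf hg
    by_cases hp : p = []
    · subst hp; rw [pvW_nil, pvW_nil]
    · have hlen : 1 ≤ p.length := List.length_pos_of_ne_nil hp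
      obtain ⟨g', rfl⟩ : ∃ g', g = g' + 1 := ⟨g - 1, by omega⟩
      rw [pvW_succ _ _ _ _ hp, pvW_succ _ _ _ _ hp]
      congr 1
      apply List.map_congr_left
      intro i hi
      have h1i : (1 : Int) ≤ i := (PySem.List.mem_pyRange_one.mp hi).1
      by_cases hgd : i ≤ (p.length : Int) ∧
          PySem.Set.contains tow (PySem.List.slice p (some (-i)) none) = true
      · rw [if_pos hgd, if_pos hgd]
        exact ih _ _ (by rw [pv_slice_to_len h1i hgd.1]; omega)
          (by rw [pv_slice_to_len h1i hgd.1]; omega)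
      · rw [if_neg hgd, if_neg hgd]

lemma pvWc_ne_nil (tow : PySem.Set (List Char)) (ms : Int) (p : List Char) (hp : p ≠ []) :
    pvWc tow ms p = ((PySem.List.pyRange 1 (ms + 1) 1).map (fun i =>
      if i ≤ (p.length : Int) ∧
          PySem.Set.contains tow (PySem.List.slice p (some (-i)) none) = true
      then pvWc tow ms (PySem.List.slice p none (some (-i))) else 0)).sum := by
  have hlen : 1 ≤ p.length := List.length_pos_of_ne_nil hp
  have h : p.length = (p.length - 1) + 1 := by omega
  rw [pvWc]
  conv_lhs => rw [h]
  rw [pvW_succ _ _ _ _ hp]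
  congr 1
  apply List.map_congr_left
  intro i hi
  have h1i : (1 : Int) ≤ i := (PySem.List.mem_pyRange_one.mp hi).1
  by_cases hgd : i ≤ (p.length : Int) ∧
      PySem.Set.contains tow (PySem.List.slice p (some (-i)) none) = true
  · rw [if_pos hgd, if_pos hgd]
    exact pvW_stable tow ms _ _ _ (by rw [pv_slice_to_len h1i hgd.1]; omega) le_rfl
  · rw [if_neg hgd, if_neg hgd]

def pvGood (tow : PySem.Set (List Char)) (ms : Int) (memo : PySem.Dict (List Char) Int) : Prop :=
  ∀ k v, memo.get? k = some v → v = pvWc tow ms k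

lemma pvGoA_fold (tow : PySem.Set (List Char)) (ms : Int) (f : Nat) (p : List Char)
    (hf : p.length ≤ f + 1)
    (ih : ∀ (q : List Char) (memo : PySem.Dict (List Char) Int), pvGood tow ms memo →
      q.length ≤ f → (pvGoA tow ms f q memo).1 = pvWc tow ms q ∧
        pvGood tow ms (pvGoA tow ms f q memo).2) :
    ∀ (l : List Int), (∀ i ∈ l, (1 : Int) ≤ i) →
      ∀ (acc : Int) (memo : PySem.Dict (List Char) Int), pvGood tow ms memo →
      (l.foldl (fun (st : Int × PySem.Dict (List Char) Int) i =>
          if i ≤ (p.length : Int) ∧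
              PySem.Set.contains tow (PySem.List.slice p (some (-i)) none) = true then
            let r := pvGoA tow ms f (PySem.List.slice p none (some (-i))) st.2
            (st.1 + r.1, r.2)
          else st) (acc, memo)).1
        = acc + (l.map (fun i =>
            if i ≤ (p.length : Int) ∧
                PySem.Set.contains tow (PySem.List.slice p (some (-i)) none) = true
            then pvWc tow ms (PySem.List.slice p none (some (-i))) else 0)).sum
      ∧ pvGood tow ms (l.foldl (fun (st : Int × PySem.Dict (List Char) Int) i =>
          if i ≤ (p.length : Int) ∧
              PySem.Set.contains tow (PySem.List.slice p (some (-i)) none) = true then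
            let r := pvGoA tow ms f (PySem.List.slice p none (some (-i))) st.2
            (st.1 + r.1, r.2)
          else st) (acc, memo)).2 := by
  intro l
  induction l with
  | nil => intro _ acc memo hmemo; exact ⟨by simp, hmemo⟩
  | cons i l ihl =>
    intro hmem acc memo hmemo
    simp only [List.foldl_cons, List.map_cons, List.sum_cons]
    by_cases hgd : i ≤ (p.length : Int) ∧
        PySem.Set.contains tow (PySem.List.slice p (some (-i)) none) = true
    · have h1i : (1 : Int) ≤ i := hmem i (List.mem_cons_self)
      have hql : (PySem.List.slice p none (some (-i))).length ≤ f := by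
        rw [pv_slice_to_len h1i hgd.1]; omega
      obtain ⟨hr1, hr2⟩ := ih (PySem.List.slice p none (some (-i))) memo hmemo hql
      simp only [if_pos hgd]
      obtain ⟨hf1, hf2⟩ := ihl (fun j hj => hmem j (List.mem_cons_of_mem _ hj))
        (acc + (pvGoA tow ms f (PySem.List.slice p none (some (-i))) memo).1)
        (pvGoA tow ms f (PySem.List.slice p none (some (-i))) memo).2 hr2
      refine ⟨?_, hf2⟩
      rw [hf1, hr1]; ring
    · simp only [if_neg hgd]
      obtain ⟨hf1, hf2⟩ := ihl (fun j hj => hmem j (List.mem_cons_of_mem _ hj)) acc memo hmemo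
      exact ⟨by rw [hf1]; ring, hf2⟩

lemma pvGoA_spec (tow : PySem.Set (List Char)) (ms : Int) :
    ∀ (fuel : Nat) (p : List Char) (memo : PySem.Dict (List Char) Int),
      pvGood tow ms memo → p.length ≤ fuel →
      (pvGoA tow ms fuel p memo).1 = pvWc tow ms p ∧
        pvGood tow ms (pvGoA tow ms fuel p memo).2 := by
  intro fuel
  induction fuel with
  | zero =>
    intro p memo hmemo hlen
    have hp : p = [] := List.eq_nil_of_length_eq_zero (Nat.le_zero.mp hlen)
    subst hp
    constructor
    · simp [pvGoA, pvWc, pvW_nil]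
    · simpa [pvGoA] using hmemo
  | succ f ih =>
    intro p memo hmemo hlen
    by_cases hp : p = []
    · subst hp
      constructor
      · simp [pvGoA, pvWc, pvW_nil]
      · simpa [pvGoA] using hmemo
    · cases hm : memo.get? p with
      | some v =>
        constructor
        · simp only [pvGoA, if_neg hp, hm]
          exact hmemo p v hm
        · simpa only [pvGoA, if_neg hp, hm] using hmemo
      | none =>
        have hone : ∀ i ∈ PySem.List.pyRange 1 (ms + 1) 1, (1 : Int) ≤ i :=
          fun i hi => (PySem.List.mem_pyRange_one.mp hi).1
        obtain ⟨hf1, hf2⟩ := pvGoA_fold tow ms f p hlen ih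
          (PySem.List.pyRange 1 (ms + 1) 1) hone 0 memo hmemo
        constructor
        · have h1 : (pvGoA tow ms (f + 1) p memo).1 =
              ((PySem.List.pyRange 1 (ms + 1) 1).foldl (fun (st : Int × PySem.Dict (List Char) Int) i =>
                if i ≤ (p.length : Int) ∧
                    PySem.Set.contains tow (PySem.List.slice p (some (-i)) none) = true then
                  let r := pvGoA tow ms f (PySem.List.slice p none (some (-i))) st.2
                  (st.1 + r.1, r.2)
                else st) ((0 : Int), memo)).1 := by
            simp only [pvGoA, if_neg hp, hm]
          rw [h1, hf1, pvWc_ne_nil tow ms p hp]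
          ring
        · have h2 : (pvGoA tow ms (f + 1) p memo).2 =
              PySem.Dict.insert
                ((PySem.List.pyRange 1 (ms + 1) 1).foldl (fun (st : Int × PySem.Dict (List Char) Int) i =>
                  if i ≤ (p.length : Int) ∧
                      PySem.Set.contains tow (PySem.List.slice p (some (-i)) none) = true then
                    let r := pvGoA tow ms f (PySem.List.slice p none (some (-i))) st.2
                    (st.1 + r.1, r.2)
                  else st) ((0 : Int), memo)).2 p
                ((PySem.List.pyRange 1 (ms + 1) 1).foldl (fun (st : Int × PySem.Dict (List Char) Int) i =>
                  if i ≤ (p.length : Int) ∧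
                      PySem.Set.contains tow (PySem.List.slice p (some (-i)) none) = true then
                    let r := pvGoA tow ms f (PySem.List.slice p none (some (-i))) st.2
                    (st.1 + r.1, r.2)
                  else st) ((0 : Int), memo)).1 := by
            simp only [pvGoA, if_neg hp, hm]
          rw [h2]
          intro k v hkv
          rw [PySem.Dict.get?_insert] at hkv
          by_cases hk : k = p
          · rw [if_pos hk] at hkv
            have hv : v = _ := (Option.some.injEq _ _).mp hkv.symm
            rw [hk, hv, hf1, pvWc_ne_nil tow ms p hp]
            ring
          · rw [if_neg hk] at hkv
            exact hf2 k v hkv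
lemma pv_pyRange_self (a : Int) : PySem.List.pyRange a a 1 = [] := by
  refine List.eq_nil_iff_forall_not_mem.mpr (fun x hx => ?_)
  have := PySem.List.mem_pyRange_one.mp hx
  omega

lemma pv_sum_range (ms jI : Int) (h0 : 0 ≤ ms) (h1 : 1 ≤ jI) (Q : Int → Bool) (g : Int → Int) :
    ((PySem.List.pyRange 1 (ms + 1) 1).map (fun i => if i ≤ jI ∧ Q i = true then g i else 0)).sum
      = ((PySem.List.pyRange 1 (min jI ms + 1) 1).map
          (fun i => if Q i = true then g i else 0)).sum := by
  rw [PySem.List.pyRange_one_append 1 (min jI ms + 1) (ms + 1) (by omega) (by omega)]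
  rw [List.map_append, List.sum_append]
  have hz : ((PySem.List.pyRange (min jI ms + 1) (ms + 1) 1).map
      (fun i => if i ≤ jI ∧ Q i = true then g i else 0)).sum = 0 := by
    by_cases hc : jI ≤ ms
    · have hmin : min jI ms = jI := by omega
      apply List.sum_eq_zero
      intro x hx
      obtain ⟨i, hi, rfl⟩ := List.mem_map.mp hx
      have hmi := PySem.List.mem_pyRange_one.mp hi
      rw [hmin] at hmi
      exact if_neg (fun h => absurd h.1 (by omega))
    · have hmin : min jI ms = ms := by omega
      rw [hmin, pv_pyRange_self]
      simp
  rw [hz, add_zero]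
  congr 1
  apply List.map_congr_left
  intro i hi
  have hmi := PySem.List.mem_pyRange_one.mp hi
  by_cases hq : Q i = true
  · rw [if_pos ⟨by omega, hq⟩, if_pos hq]
  · rw [if_neg (fun h => hq h.2), if_neg hq]

lemma pv_slice_take_from (t : List Char) (j k : Nat) (hk : 1 ≤ k) (hkj : k ≤ j)
    (hj : j ≤ t.length) :
    PySem.List.slice (t.take j) (some (-(k : Int))) none
      = PySem.List.slice t (some ((j : Int) - k)) (some (j : Int)) := by
  rw [PySem.List.slice_from_neg_natCast _ k (by omega)]
  have hc : ((j : Int) - k) = ((j - k : Nat) : Int) := by omega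
  rw [hc, PySem.List.slice_natCast]
  rw [List.length_take, min_eq_left hj, List.drop_take]

lemma pv_slice_take_to (t : List Char) (j k : Nat) (hk : 1 ≤ k) (hkj : k ≤ j)
    (hj : j ≤ t.length) :
    PySem.List.slice (t.take j) none (some (-(k : Int))) = t.take (j - k) := by
  rw [PySem.List.slice_to_neg_natCast _ k (by omega), List.length_take, min_eq_left hj,
    List.take_take, min_eq_left (by omega)]

lemma pvInner (tow : PySem.Set (List Char)) (t : List Char) (j : Nat) (_hj1 : 1 ≤ j)
    (hjn : j ≤ t.length) :
    ∀ (l : List Int), (∀ i ∈ l, (1 : Int) ≤ i ∧ i ≤ (j : Int)) →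
    ∀ (dp : List Int), dp.length = t.length + 1 →
      ((l.foldl (fun dp i =>
          if PySem.Set.contains tow
              (PySem.List.slice t (some ((j : Int) - i)) (some (j : Int))) = true then
            PySem.List.pySetD dp ((j : Int))
              (PySem.List.pyGetD dp ((j : Int)) 0 + PySem.List.pyGetD dp ((j : Int) - i) 0)
          else dp) dp).length = t.length + 1
      ∧ (∀ k : Nat, k ≠ j → PySem.List.pyGetD (l.foldl (fun dp i =>
          if PySem.Set.contains tow
              (PySem.List.slice t (some ((j : Int) - i)) (some (j : Int))) = true then
            PySem.List.pySetD dp ((j : Int))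
              (PySem.List.pyGetD dp ((j : Int)) 0 + PySem.List.pyGetD dp ((j : Int) - i) 0)
          else dp) dp) ((k : Int)) 0 = PySem.List.pyGetD dp ((k : Int)) 0)
      ∧ PySem.List.pyGetD (l.foldl (fun dp i =>
          if PySem.Set.contains tow
              (PySem.List.slice t (some ((j : Int) - i)) (some (j : Int))) = true then
            PySem.List.pySetD dp ((j : Int))
              (PySem.List.pyGetD dp ((j : Int)) 0 + PySem.List.pyGetD dp ((j : Int) - i) 0)
          else dp) dp) ((j : Int)) 0
        = PySem.List.pyGetD dp ((j : Int)) 0 + (l.map (fun i =>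
            if PySem.Set.contains tow
                (PySem.List.slice t (some ((j : Int) - i)) (some (j : Int))) = true then
              PySem.List.pyGetD dp ((j : Int) - i) 0 else 0)).sum) := by
  intro l
  induction l with
  | nil => intro _ dp hdp; exact ⟨hdp, fun _ _ => rfl, by simp⟩
  | cons i l ihl =>
    intro hmem dp hdp
    obtain ⟨h1i, hij⟩ := hmem i List.mem_cons_self
    have hjd : j < dp.length := by omega
    have hji : ((j : Int) - i) = ((j - i.toNat : Nat) : Int) := by omega
    simp only [List.foldl_cons, List.map_cons, List.sum_cons]
    by_cases hgd : PySem.Set.contains tow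
        (PySem.List.slice t (some ((j : Int) - i)) (some (j : Int))) = true
    · rw [if_pos hgd]
      have hset : ∀ k : Nat,
          PySem.List.pyGetD (PySem.List.pySetD dp ((j : Int))
            (PySem.List.pyGetD dp ((j : Int)) 0 + PySem.List.pyGetD dp ((j : Int) - i) 0))
            ((k : Int)) 0
          = if k = j then PySem.List.pyGetD dp ((j : Int)) 0 + PySem.List.pyGetD dp ((j : Int) - i) 0
            else PySem.List.pyGetD dp ((k : Int)) 0 :=
        fun k => PySem.List.pyGetD_pySetD_natCast dp j k _ 0 hjd
      obtain ⟨hl, hne, hjv⟩ := ihl (fun x hx => hmem x (List.mem_cons_of_mem _ hx))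
        (PySem.List.pySetD dp ((j : Int))
          (PySem.List.pyGetD dp ((j : Int)) 0 + PySem.List.pyGetD dp ((j : Int) - i) 0))
        (by rw [PySem.List.length_pySetD]; exact hdp)
      have hterm : ∀ x ∈ l, (if PySem.Set.contains tow
            (PySem.List.slice t (some ((j : Int) - x)) (some (j : Int))) = true then
          PySem.List.pyGetD (PySem.List.pySetD dp ((j : Int))
            (PySem.List.pyGetD dp ((j : Int)) 0 + PySem.List.pyGetD dp ((j : Int) - i) 0))
            ((j : Int) - x) 0 else 0)
          = (if PySem.Set.contains tow
            (PySem.List.slice t (some ((j : Int) - x)) (some (j : Int))) = true then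
          PySem.List.pyGetD dp ((j : Int) - x) 0 else 0) := by
        intro x hx
        obtain ⟨h1x, hxj⟩ := hmem x (List.mem_cons_of_mem _ hx)
        have hjx : ((j : Int) - x) = ((j - x.toNat : Nat) : Int) := by omega
        have hkx : j - x.toNat ≠ j := by omega
        rw [hjx, hset (j - x.toNat), if_neg hkx]
      refine ⟨hl, ?_, ?_⟩
      · intro k hk
        rw [hne k hk, hset k, if_neg hk]
      · rw [hjv, List.map_congr_left hterm, hset j, if_pos rfl, if_pos hgd]
        ring
    · rw [if_neg hgd]
      obtain ⟨hl, hne, hjv⟩ := ihl (fun x hx => hmem x (List.mem_cons_of_mem _ hx)) dp hdp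
      refine ⟨hl, hne, ?_⟩
      rw [hjv, if_neg hgd]
      ring

def pvDPstep (tow : PySem.Set (List Char)) (ms : Int) (t : List Char) :
    List Int → Int → List Int :=
  fun dp j => (PySem.List.pyRange 1 (min j ms + 1) 1).foldl
    (fun dp i =>
      if PySem.Set.contains tow (PySem.List.slice t (some (j - i)) (some j)) = true then
        PySem.List.pySetD dp j (PySem.List.pyGetD dp j 0 + PySem.List.pyGetD dp (j - i) 0)
      else dp) dp

lemma pvWaysB_eq_fold (tow : PySem.Set (List Char)) (ms : Int) (t : List Char) :
    pvWaysB tow ms t = PySem.List.pyGetD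
      ((PySem.List.pyRange 1 ((t.length : Int) + 1) 1).foldl (pvDPstep tow ms t)
        (1 :: List.replicate t.length 0)) ((t.length : Int)) 0 := rfl

lemma pvOuter (tow : PySem.Set (List Char)) (ms : Int) (h0 : 0 ≤ ms) (t : List Char) :
    ∀ m : Nat, m ≤ t.length →
      (((PySem.List.pyRange 1 ((m : Int) + 1) 1).foldl (pvDPstep tow ms t)
          (1 :: List.replicate t.length 0)).length = t.length + 1)
      ∧ (∀ k : Nat, k ≤ t.length →
          PySem.List.pyGetD ((PySem.List.pyRange 1 ((m : Int) + 1) 1).foldl (pvDPstep tow ms t)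
            (1 :: List.replicate t.length 0)) ((k : Int)) 0
          = if k ≤ m then pvWc tow ms (t.take k) else 0) := by
  intro m
  induction m with
  | zero =>
    intro _
    have hr : PySem.List.pyRange 1 (((0 : Nat) : Int) + 1) 1 = [] := by
      rw [show (((0 : Nat) : Int) + 1) = 1 by norm_num, pv_pyRange_self]
    rw [hr]
    simp only [List.foldl_nil]
    refine ⟨by simp, fun k hk => ?_⟩
    rw [PySem.List.pyGetD_natCast]
    rcases k with _ | k'
    · simp only [List.getD_cons_zero, Nat.le_refl, if_pos]
      rw [List.take_zero]
      rw [pvWc, pvW_nil]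
    · rw [if_neg (by omega), List.getD_cons_succ]
      rcases Nat.lt_or_ge k' t.length with h | h
      · rw [List.getD_eq_getElem _ _ (by simpa using h)]
        simp
      · rw [List.getD_eq_default _ _ (by simpa using h)]
  | succ m ihm =>
    intro hmn
    have ih := ihm (by omega)
    have hcast : (((m + 1 : Nat) : Int) + 1) = (((m : Int) + 1) + 1) := by push_cast; ring
    rw [hcast, PySem.List.pyRange_one_succ_right (by omega : (1 : Int) ≤ (m : Int) + 1),
      List.foldl_append]
    simp only [List.foldl_cons, List.foldl_nil]
    set dpm := (PySem.List.pyRange 1 ((m : Int) + 1) 1).foldl (pvDPstep tow ms t)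
      (1 :: List.replicate t.length 0) with hdpm
    have hstep : pvDPstep tow ms t dpm ((m : Int) + 1)
        = (PySem.List.pyRange 1 (min ((m : Int) + 1) ms + 1) 1).foldl
          (fun dp i =>
            if PySem.Set.contains tow
                (PySem.List.slice t (some (((m : Int) + 1) - i))
                  (some ((m : Int) + 1))) = true then
              PySem.List.pySetD dp ((m : Int) + 1)
                (PySem.List.pyGetD dp ((m : Int) + 1) 0 +
                  PySem.List.pyGetD dp (((m : Int) + 1) - i) 0)
            else dp) dpm := rfl
    rw [hstep]
    have hl : ∀ i ∈ PySem.List.pyRange 1 (min (((m + 1 : Nat)) : Int) ms + 1) 1,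
        (1 : Int) ≤ i ∧ i ≤ (((m + 1 : Nat)) : Int) := by
      intro i hi
      have := PySem.List.mem_pyRange_one.mp hi
      have hle : min (((m + 1 : Nat)) : Int) ms ≤ (((m + 1 : Nat)) : Int) := min_le_left _ _
      exact ⟨this.1, by omega⟩
    obtain ⟨hL, hNE, hJ⟩ := pvInner tow t (m + 1) (by omega) (by omega)
      (PySem.List.pyRange 1 (min (((m + 1 : Nat)) : Int) ms + 1) 1) hl dpm ih.1
    simp only [Nat.cast_add, Nat.cast_one] at hL hNE hJ
    refine ⟨hL, fun k hk => ?_⟩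
    by_cases hkm : k = m + 1
    · subst hkm
      simp only [Nat.cast_add, Nat.cast_one]
      have ihm1 := ih.2 (m + 1) hk
      simp only [Nat.cast_add, Nat.cast_one] at ihm1
      rw [hJ, ihm1, if_neg (by omega), if_pos le_rfl, zero_add]
      have hplen : (t.take (m + 1)).length = m + 1 := by
        rw [List.length_take]; omega
      have hpne : t.take (m + 1) ≠ [] := by
        intro h
        have := congrArg List.length h
        rw [hplen] at this
        simp at this
      rw [pvWc_ne_nil tow ms (t.take (m + 1)) hpne]
      simp only [hplen, Nat.cast_add, Nat.cast_one]
      rw [pv_sum_range ms ((m : Int) + 1) h0 (by omega)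
        (fun i => PySem.Set.contains tow
          (PySem.List.slice (t.take (m + 1)) (some (-i)) none))
        (fun i => pvWc tow ms (PySem.List.slice (t.take (m + 1)) none (some (-i))))]
      symm
      apply congrArg List.sum
      apply List.map_congr_left
      intro i hi
      have hmi := PySem.List.mem_pyRange_one.mp hi
      have hims : i ≤ ms := by
        have := min_le_right ((m : Int) + 1) ms
        omega
      have himj : i ≤ (m : Int) + 1 := by
        have := min_le_left ((m : Int) + 1) ms
        omega
      obtain ⟨k', rfl⟩ := Int.eq_ofNat_of_zero_le (by omega : (0 : Int) ≤ i)
      have hk1 : 1 ≤ k' := by exact_mod_cast hmi.1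
      have hkj : k' ≤ m + 1 := by
        have : (k' : Int) ≤ ((m + 1 : Nat) : Int) := by omega
        exact_mod_cast this
      have hfrom := pv_slice_take_from t (m + 1) k' hk1 hkj (by omega)
      have hto := pv_slice_take_to t (m + 1) k' hk1 hkj (by omega)
      simp only [Nat.cast_add, Nat.cast_one] at hfrom hto
      rw [hfrom, hto]
      by_cases hq : PySem.Set.contains tow
          (PySem.List.slice t (some (((m : Int) + 1) - (k' : Int)))
            (some ((m : Int) + 1))) = true
      · rw [if_pos hq, if_pos hq]
        have hcast2 : (((m : Int) + 1) - (k' : Int)) = (((m + 1 - k' : Nat)) : Int) := by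
          omega
        rw [hcast2, ih.2 (m + 1 - k') (by omega), if_pos (by omega)]
      · rw [if_neg hq, if_neg hq]
    · rw [hNE k hkm, ih.2 k hk]
      by_cases hkm2 : k ≤ m
      · rw [if_pos hkm2, if_pos (by omega)]
      · rw [if_neg hkm2, if_neg (by omega)]

lemma pvWaysB_eq (tow : PySem.Set (List Char)) (ms : Int) (h0 : 0 ≤ ms) (t : List Char) :
    pvWaysB tow ms t = pvWc tow ms t := by
  rw [pvWaysB_eq_fold]
  rw [(pvOuter tow ms h0 t t.length le_rfl).2 t.length le_rfl]
  rw [if_pos le_rfl, List.take_length]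

lemma pvW_congr (towA towB : PySem.Set (List Char))
    (hC : ∀ y, towA.contains y = towB.contains y) (ms : Int) :
    ∀ (fuel : Nat) (p : List Char), pvW towA ms fuel p = pvW towB ms fuel p := by
  intro fuel
  induction fuel with
  | zero =>
    intro p
    by_cases hp : p = [] <;> simp [pvW, hp]
  | succ f ih =>
    intro p
    by_cases hp : p = []
    · subst hp; rw [pvW_nil, pvW_nil]
    · rw [pvW_succ _ _ _ _ hp, pvW_succ _ _ _ _ hp]
      congr 1
      apply List.map_congr_left
      intro i _
      rw [hC]
      by_cases hgd : i ≤ (p.length : Int) ∧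
          PySem.Set.contains towB (PySem.List.slice p (some (-i)) none) = true
      · rw [if_pos hgd, if_pos hgd, ih]
      · rw [if_neg hgd, if_neg hgd]

lemma pvWc_congr (towA towB : PySem.Set (List Char))
    (hC : ∀ y, towA.contains y = towB.contains y) (ms : Int) (p : List Char) :
    pvWc towA ms p = pvWc towB ms p := pvW_congr towA towB hC ms p.length p

lemma pv_max_eq (l1 l2 : List Int) (hmem : ∀ y, y ∈ l1 ↔ y ∈ l2) :
    PySem.List.max? l1 (fun x => x) = PySem.List.max? l2 (fun x => x) := by
  cases h1 : PySem.List.max? l1 (fun x => x) with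
  | none =>
    cases h2 : PySem.List.max? l2 (fun x => x) with
    | none => rfl
    | some m2 =>
      rw [PySem.List.max?_eq_none_iff] at h1
      have hm : m2 ∈ l1 := (hmem m2).mpr (PySem.List.max?_mem h2)
      rw [h1] at hm
      exact absurd hm (List.not_mem_nil)
  | some m1 =>
    cases h2 : PySem.List.max? l2 (fun x => x) with
    | none =>
      rw [PySem.List.max?_eq_none_iff] at h2
      have hm : m1 ∈ l2 := (hmem m1).mp (PySem.List.max?_mem h1)
      rw [h2] at hm
      exact absurd hm (List.not_mem_nil)
    | some m2 =>
      have e1 := PySem.List.max?_isMax h1 m2 ((hmem m2).mpr (PySem.List.max?_mem h2))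
      have e2 := PySem.List.max?_isMax h2 m1 ((hmem m1).mp (PySem.List.max?_mem h1))
      rw [le_antisymm e2 e1]

lemma pv_body_eq (line0 : String) (targets : List String) :
    (targets.foldl
      (fun count target =>
        count + (pvGoA
          (PySem.Set.ofList
            ((PySem.List.sorted ((PySem.Str.split? line0 ", ").getD []) (fun x => x) false).map
              String.toList))
          (match PySem.List.max? ((PySem.Set.ofList
              ((PySem.List.sorted ((PySem.Str.split? line0 ", ").getD []) (fun x => x) false).map
                String.toList)).map (fun t => (t.length : Int))) (fun x => x) with
            | some m => m
            | none => 0)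
          target.toList.length target.toList PySem.Dict.empty).1) 0)
    = targets.foldl
      (fun total target => total + pvWaysB
        (PySem.Set.ofList (((PySem.Str.split? line0 ", ").getD []).map String.toList))
        (match PySem.List.max? ((PySem.Set.ofList
            (((PySem.Str.split? line0 ", ").getD []).map String.toList)).map
              (fun t => (t.length : Int))) (fun x => x) with
          | some m => m
          | none => 0)
        target.toList) 0 := by
  set parts := (PySem.Str.split? line0 ", ").getD [] with hparts
  set TA : PySem.Set (List Char) := PySem.Set.ofList
    ((PySem.List.sorted parts (fun x => x) false).map String.toList) with hTA
  set TB : PySem.Set (List Char) := PySem.Set.ofList (parts.map String.toList) with hTB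
  have hmem : ∀ y, y ∈ TA ↔ y ∈ TB := by
    intro y
    rw [hTA, hTB]
    simp only [PySem.Set.mem_ofList, List.mem_map]
    constructor
    · rintro ⟨s, hs, rfl⟩
      exact ⟨s, (PySem.List.mem_sorted parts (fun x => x) false s).mp hs, rfl⟩
    · rintro ⟨s, hs, rfl⟩
      exact ⟨s, (PySem.List.mem_sorted parts (fun x => x) false s).mpr hs, rfl⟩
  have hC : ∀ y, TA.contains y = TB.contains y := by
    intro y
    by_cases h : y ∈ TA
    · rw [(PySem.Set.contains_iff TA y).mpr h,
        (PySem.Set.contains_iff TB y).mpr ((hmem y).mp h)]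
    · have hA : TA.contains y = false :=
        Bool.eq_false_iff.mpr (fun hc => h ((PySem.Set.contains_iff TA y).mp hc))
      have hB : TB.contains y = false :=
        Bool.eq_false_iff.mpr (fun hc => (h ((hmem y).mpr ((PySem.Set.contains_iff TB y).mp hc))))
      rw [hA, hB]
  have hmem2 : ∀ y, y ∈ TA.map (fun t => (t.length : Int)) ↔
      y ∈ TB.map (fun t => (t.length : Int)) := by
    intro y
    simp only [List.mem_map]
    constructor
    · rintro ⟨s, hs, rfl⟩; exact ⟨s, (hmem s).mp hs, rfl⟩
    · rintro ⟨s, hs, rfl⟩; exact ⟨s, (hmem s).mpr hs, rfl⟩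
  have hmax := pv_max_eq _ _ hmem2
  rw [hmax]
  have h0 : (0 : Int) ≤ (match PySem.List.max? (TB.map (fun t => (t.length : Int)))
      (fun x => x) with | some m => m | none => 0) := by
    cases hm : PySem.List.max? (TB.map (fun t => (t.length : Int))) (fun x => x) with
    | none => simp
    | some m =>
      obtain ⟨s, _, rfl⟩ := List.mem_map.mp (PySem.List.max?_mem hm)
      simp
  apply PySem.List.foldl_congr_mem
  intro acc target _
  have hempty : pvGood TA (match PySem.List.max? (TB.map (fun t => (t.length : Int)))
      (fun x => x) with | some m => m | none => 0) PySem.Dict.empty := by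
    intro k v h
    rw [PySem.Dict.get?_empty] at h
    exact absurd h (by simp)
  rw [(pvGoA_spec TA _ target.toList.length target.toList PySem.Dict.empty hempty le_rfl).1,
    pvWaysB_eq TB _ h0 target.toList,
    pvWc_congr TA TB hC _ target.toList]

lemma pv_main (lines : List String) (hpre : Pre_handle_part_2 lines) :
    handle_part_2 lines = handle_part_2_alt lines := by
  obtain ⟨x, rest, rfl⟩ : ∃ a r, lines = a :: r := by
    cases lines with
    | nil => exact absurd rfl hpre
    | cons a r => exact ⟨a, r, rfl⟩
  have hget : PySem.List.pyGet? (x :: rest) (0 : Int) = some x := by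
    rw [show (0 : Int) = ((0 : Nat) : Int) from rfl, PySem.List.pyGet?_natCast]
    rfl
  simp only [handle_part_2, handle_part_2_alt, hget]
  exact pv_body_eq x (PySem.List.slice (x :: rest) (some 2) none)

-- ===== VERDICT (by name: the statement is the Claim_ definition above) =====
theorem handle_part_2_spec : Claim_equal_handle_part_2 :=
  fun lines _ hpre => pv_main lines hpre
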